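-- pv_equiv track=rewrite | github.com/cosmologicon/pyjam | pyweek31/src/view.py | HrotH
-- ===== SOURCE A (Python) =====
-- def HrotH(pH, angle = 1):
-- 	angle %= 6
-- 	xH, yH = pH
-- 	if angle >= 3:
-- 		xH, yH = -xH, -yH
-- 		angle -= 3
-- 	while angle > 0:
-- 		xH, yH = xH + yH, -xH
-- 		angle -= 1
-- 	return xH, yH
-- ===== SOURCE B (Python) =====
-- def HrotH(pH, angle = 1):
--     xH, yH = pH
--     return ((xH, yH), (xH + yH, -xH), (yH, -xH - yH),
--             (-xH, -yH), (-xH - yH, xH), (-yH, xH + yH))[angle % 6]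
-- ===== Notes on version B (the rewrite author's own statement) =====
-- stated objective: simpler
-- what changed: Replaces the negate-then-iterate rotation loop with a direct six-entry table of closed-form rotations indexed by angle % 6.
import Mathlib
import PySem

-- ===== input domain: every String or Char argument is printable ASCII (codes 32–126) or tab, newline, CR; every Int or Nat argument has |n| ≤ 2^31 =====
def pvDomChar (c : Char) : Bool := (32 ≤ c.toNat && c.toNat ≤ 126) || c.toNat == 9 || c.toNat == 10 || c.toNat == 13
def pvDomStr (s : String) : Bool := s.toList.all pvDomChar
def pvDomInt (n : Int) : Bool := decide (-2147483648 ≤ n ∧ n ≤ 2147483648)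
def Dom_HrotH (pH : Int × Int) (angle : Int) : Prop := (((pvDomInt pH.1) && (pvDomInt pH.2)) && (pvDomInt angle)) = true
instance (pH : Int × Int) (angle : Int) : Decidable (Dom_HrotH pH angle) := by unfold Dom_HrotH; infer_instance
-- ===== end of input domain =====

-- B replaces A's negate-then-iterate rotation loop with a six-entry table of closed-form rotations indexed by angle % 6 (simpler).


-- ===== PORT A =====
-- while-loop of A: (xH,yH) -> (xH+yH,-xH) while angle > 0
def HrotHLoop (xH yH angle : Int) : Int × Int :=
  if h : angle > 0 then HrotHLoop (xH + yH) (-xH) (angle - 1) else (xH, yH)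
termination_by angle.toNat
decreasing_by omega

def HrotH (pH : Int × Int) (angle : Int) : Int × Int :=
  let angle := PySem.Int.mod angle 6
  let xH := pH.1
  let yH := pH.2
  if angle ≥ 3 then HrotHLoop (-xH) (-yH) (angle - 3)
  else HrotHLoop xH yH angle

-- ===== PORT B =====
def HrotH_alt (pH : Int × Int) (angle : Int) : Int × Int :=
  let xH := pH.1
  let yH := pH.2
  [(xH, yH), (xH + yH, -xH), (yH, -xH - yH),
   (-xH, -yH), (-xH - yH, xH), (-yH, xH + yH)] |> (fun l => PySem.List.pyGet? l (PySem.Int.mod angle 6)) |>.getD (0, 0)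

-- ===== PRECONDITION & SPEC =====
def Spec_HrotH (pH : Int × Int) (angle : Int) (out : Int × Int) : Prop := out = HrotH_alt pH angle
instance (pH : Int × Int) (angle : Int) (out : Int × Int) : Decidable (Spec_HrotH pH angle out) := by unfold Spec_HrotH; infer_instance

-- ===== CLAIM (what is proved, stated in full; the proofs are below) =====
def Claim_equal_HrotH : Prop := ∀ (pH : Int × Int) (angle : Int), Dom_HrotH pH angle → Spec_HrotH pH angle (HrotH pH angle)

-- ===== LEMMAS AND PROOFS =====

-- ===== VERDICT (by name: the statement is the Claim_ definition above) =====
theorem loop_zero (x y : Int) : HrotHLoop x y 0 = (x, y) := by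
  unfold HrotHLoop; simp

theorem loop_succ (x y a : Int) (h : a > 0) :
    HrotHLoop x y a = HrotHLoop (x + y) (-x) (a - 1) := by
  rw [HrotHLoop]; simp [h]

theorem HrotH_spec : Claim_equal_HrotH := by
  intro pH angle _
  unfold Spec_HrotH HrotH HrotH_alt
  have h0 : 0 ≤ PySem.Int.mod angle 6 := PySem.Int.mod_nonneg angle (by norm_num)
  have h6 : PySem.Int.mod angle 6 < 6 := PySem.Int.mod_lt angle (by norm_num)
  set a := PySem.Int.mod angle 6 with ha
  interval_cases a <;>
    simp [loop_succ, loop_zero, PySem.List.pyGet?, PySem.List.pyIdx?] <;> ring_nf
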